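-- pv_equiv track=rewrite | github.com/Kir4kami/flow-input | Traffic Generation/traffic_generator_tree.py | get_host_list
-- ===== SOURCE A (Python) =====
-- def get_host_list(host_num, dp):
--     if host_num % dp != 0:
--         raise ValueError(f"host_num {host_num} 无法被 dp {dp} 整除")
--     span = host_num // dp
--     host_list = []
--     for start in range(span):
--         host_ids = [host_id for host_id in range(start, host_num, span)]
--         host_list.append(host_ids)
--     return host_list
-- ===== SOURCE B (Python) =====
-- def get_host_list(host_num, dp):
--     if host_num % dp != 0:
--         raise ValueError(f"host_num {host_num} 无法被 dp {dp} 整除")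
--     span = host_num // dp
--     buckets = [[] for _ in range(span)]
--     for host_id in range(host_num):
--         buckets[host_id % span].append(host_id)
--     return buckets
-- ===== Notes on version B (the rewrite author's own statement) =====
-- stated objective: alternative
-- what changed: B replaces A's nested gather (one strided range comprehension per bucket) by a single scatter pass: it preallocates span empty buckets and appends each host_id to buckets[host_id % span].
-- outside the precondition, e.g. on get_host_list(4, -2): A returns [], B raises IndexError
import Mathlib
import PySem

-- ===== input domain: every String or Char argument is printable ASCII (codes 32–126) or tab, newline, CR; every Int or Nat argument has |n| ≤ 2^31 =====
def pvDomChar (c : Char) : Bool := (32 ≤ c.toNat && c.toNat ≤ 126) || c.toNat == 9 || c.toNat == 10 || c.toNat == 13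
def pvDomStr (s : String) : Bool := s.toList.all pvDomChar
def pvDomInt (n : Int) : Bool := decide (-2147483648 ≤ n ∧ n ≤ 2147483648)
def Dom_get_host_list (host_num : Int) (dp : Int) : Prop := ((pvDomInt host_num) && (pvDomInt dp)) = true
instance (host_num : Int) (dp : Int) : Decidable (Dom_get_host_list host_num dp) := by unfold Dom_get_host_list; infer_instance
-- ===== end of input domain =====

-- B replaces A's per-bucket strided gather by a single scatter pass over all host ids (alternative decomposition, same cost).

-- ===== PORT A =====
-- literal port of A: for start in range(span): append [host_id for host_id in range(start, host_num, span)]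
-- (the ValueError branch 'host_num % dp != 0' and dp = 0 are excluded by Pre_)
def get_host_list (host_num : Int) (dp : Int) : List (List Int) :=
  let span := PySem.Int.floordiv host_num dp
  (PySem.List.pyRange 0 span 1).foldl
    (fun host_list start => host_list ++ [PySem.List.pyRange start host_num span]) []

-- ===== PORT B =====
-- literal port of Source B: span empty buckets, then one pass appending host_id to buckets[host_id % span].
-- Python's buckets[host_id % span].append raises IndexError when span ≤ 0 < host_num; List.modify is a noop
-- out of range, so the port is exact on Pre_ (which excludes that region); inside Pre_ the index is in range.
def get_host_list_alt (host_num : Int) (dp : Int) : List (List Int) :=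
  let span := PySem.Int.floordiv host_num dp
  let buckets := (PySem.List.pyRange 0 span 1).map (fun _ => ([] : List Int))
  (PySem.List.pyRange 0 host_num 1).foldl
    (fun bs host_id => bs.modify (PySem.Int.mod host_id span).toNat (fun b => b ++ [host_id])) buckets

-- ===== PRECONDITION & SPEC =====
-- Pre_ excludes dp = 0 and non-divisible host_num (A raises ValueError there), and additionally the inputs with
-- host_num > 0 ∧ dp < 0: there A returns [] (an artefact of ranging over a negative span) while B's own scatter
-- raises IndexError, so they are excluded.
def Pre_get_host_list (host_num : Int) (dp : Int) : Prop :=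
  dp ≠ 0 ∧ PySem.Int.mod host_num dp = 0 ∧ ¬(0 < host_num ∧ dp < 0)
instance (host_num : Int) (dp : Int) : Decidable (Pre_get_host_list host_num dp) := by
  unfold Pre_get_host_list; infer_instance
def pvWitness_get_host_list : Int × Int := (6, 3)

def Spec_get_host_list (host_num : Int) (dp : Int) (out : List (List Int)) : Prop := out = get_host_list_alt host_num dp
instance (host_num : Int) (dp : Int) (out : List (List Int)) : Decidable (Spec_get_host_list host_num dp out) := by unfold Spec_get_host_list; infer_instance

-- ===== CLAIM (what is proved, stated in full; the proofs are below) =====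
def Claim_equal_get_host_list : Prop := ∀ (host_num : Int) (dp : Int), Dom_get_host_list host_num dp → Pre_get_host_list host_num dp → Spec_get_host_list host_num dp (get_host_list host_num dp)

-- ===== LEMMAS AND PROOFS =====

-- a positive-step range with stop ≤ start is empty
lemma prog_nil (a b s : Int) (hs : 0 < s) (h : b ≤ a) : PySem.List.pyRange a b s = [] := by
  rw [PySem.List.pyRange_of_pos a b hs]
  simp [not_lt.mpr h]

-- extending the stop of a strided range by one appends b exactly when b lands on the progression
lemma prog_snoc_hit (s a b : Int) (hs : 0 < s) (_ha : 0 ≤ a) (_has : a < s) (hb : 0 ≤ b)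
    (h : b % s = a) :
    PySem.List.pyRange a (b + 1) s = PySem.List.pyRange a b s ++ [b] := by
  have hq : b = a + s * (b / s) := by
    have := Int.emod_add_mul_ediv b s
    omega
  set q := b / s with hqdef
  have hq0 : 0 ≤ q := Int.ediv_nonneg hb (le_of_lt hs)
  rw [PySem.List.pyRange_of_pos a (b + 1) hs, PySem.List.pyRange_of_pos a b hs]
  have hab : a ≤ b := by nlinarith
  have h1 : (b + 1 - a + s - 1) / s = q + 1 := by
    have : b + 1 - a + s - 1 = s * (q + 1) := by linarith
    rw [this, Int.mul_ediv_cancel_left _ (ne_of_gt hs)]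
  have hcount1 : (if a < b + 1 then ((b + 1 - a + s - 1) / s).toNat else 0) = q.toNat + 1 := by
    rw [if_pos (by omega), h1]; omega
  have hcount2 : (if a < b then ((b - a + s - 1) / s).toNat else 0) = q.toNat := by
    by_cases hq1 : q = 0
    · have hba : b = a := by rw [hq, hq1]; ring
      rw [if_neg (by omega)]; omega
    · have hqpos : 0 < q := lt_of_le_of_ne hq0 (Ne.symm hq1)
      have hlt : a < b := by nlinarith
      rw [if_pos hlt]
      have : b - a + s - 1 = (s - 1) + s * q := by linarith
      rw [this, Int.add_mul_ediv_left _ _ (ne_of_gt hs),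
        Int.ediv_eq_zero_of_lt (by omega) (by omega)]
      simp
  rw [hcount1, hcount2, List.range_succ, List.map_append]
  simp only [List.map_cons, List.map_nil]
  congr 1
  simp only [List.cons.injEq, and_true]
  rw [Int.toNat_of_nonneg hq0]
  linarith
-- (f q.toNat = a + s * q = b)

lemma prog_snoc_miss (s a b : Int) (hs : 0 < s) (ha : 0 ≤ a) (has : a < s) (_hb : 0 ≤ b)
    (h : b % s ≠ a) :
    PySem.List.pyRange a (b + 1) s = PySem.List.pyRange a b s := by
  rw [PySem.List.pyRange_of_pos a (b + 1) hs, PySem.List.pyRange_of_pos a b hs]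
  by_cases hab : a ≤ b
  · set t := b - a with htdef
    have ht0 : 0 ≤ t := by omega
    have hqr := Int.emod_add_mul_ediv t s
    set q := t / s with hqdef
    set r := t % s with hrdef
    have hr0 : 0 ≤ r := Int.emod_nonneg t (ne_of_gt hs)
    have hrs : r < s := Int.emod_lt_of_pos t hs
    have hrne : r ≠ 0 := by
      intro h0
      apply h
      have hbeq : b = a + s * q := by omega
      rw [hbeq]
      rw [Int.add_mul_emod_self_left]
      exact Int.emod_eq_of_lt ha has
    have hexp : s * (q + 1) = s * q + s := by ring
    have hcount1 : (b + 1 - a + s - 1) / s = q + 1 := by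
      have : b + 1 - a + s - 1 = r + s * (q + 1) := by omega
      rw [this, Int.add_mul_ediv_left _ _ (ne_of_gt hs),
        Int.ediv_eq_zero_of_lt hr0 hrs]
      simp
    have hcount2 : (b - a + s - 1) / s = q + 1 := by
      have : b - a + s - 1 = (r - 1) + s * (q + 1) := by omega
      rw [this, Int.add_mul_ediv_left _ _ (ne_of_gt hs),
        Int.ediv_eq_zero_of_lt (by omega) (by omega)]
      simp
    have hab' : a < b := by
      have : 1 ≤ r := by omega
      have hq0 : 0 ≤ q := Int.ediv_nonneg ht0 (le_of_lt hs)
      nlinarith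
    rw [if_pos (by omega), if_pos hab', hcount1, hcount2]
  · rw [if_neg (by omega), if_neg (by omega)]

-- B's scatter over range(m) fills bucket j with exactly the strided range(j, m, s)
lemma scatter_eq (s : Int) (hs : 0 < s) (m : Nat) :
    (PySem.List.pyRange 0 (m : Int) 1).foldl
      (fun bs i => bs.modify (PySem.Int.mod i s).toNat (fun b => b ++ [i]))
      ((PySem.List.pyRange 0 s 1).map (fun _ => ([] : List Int)))
    = (PySem.List.pyRange 0 s 1).map (fun j => PySem.List.pyRange j (m : Int) s) := by
  induction m with
  | zero =>
    simp only [Nat.cast_zero]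
    rw [PySem.List.pyRange_one_eq_nil (le_refl 0), List.foldl_nil]
    apply List.map_congr_left
    intro j hj
    have hj' := PySem.List.mem_pyRange_one.mp hj
    exact (prog_nil j 0 s hs hj'.1).symm
  | succ n ih =>
    have hcast : ((n + 1 : Nat) : Int) = (n : Int) + 1 := by push_cast; ring
    rw [hcast, PySem.List.pyRange_one_succ_right (by positivity), List.foldl_append,
      List.foldl_cons, List.foldl_nil, ih]
    apply List.ext_getElem
    · simp [List.length_modify]
    · intro k hk1 hk2
      rw [List.getElem_modify]
      simp only [List.getElem_map, PySem.List.getElem_pyRange_one, zero_add]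
      have hklen : k < (PySem.List.pyRange 0 s 1).length := by
        simpa [List.length_modify] using hk1
      have hks : (k : Int) < s := by
        have := PySem.List.length_pyRange_one (a := 0) (b := s)
        omega
      have hmod : PySem.Int.mod (n : Int) s = (n : Int) % s :=
        PySem.Int.mod_eq_emod_of_pos hs
      by_cases hhit : (n : Int) % s = (k : Int)
      · rw [if_pos]
        · exact (prog_snoc_hit s (k : Int) (n : Int) hs (by positivity) hks (by positivity)
            hhit).symm
        · rw [hmod, hhit]; omega
      · rw [if_neg]
        · exact (prog_snoc_miss s (k : Int) (n : Int) hs (by positivity) hks (by positivity)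
            hhit).symm
        · intro hEq
          apply hhit
          have hnn : 0 ≤ (n : Int) % s := Int.emod_nonneg _ (ne_of_gt hs)
          omega

-- scattering into no buckets leaves no buckets
lemma scatter_nil (l : List Int) (s : Int) :
    l.foldl (fun bs i => bs.modify (PySem.Int.mod i s).toNat (fun b => b ++ [i]))
      ([] : List (List Int)) = [] := by
  induction l with
  | nil => rfl
  | cons x xs ih => simpa using ih

-- ===== VERDICT (by name: the statement is the Claim_ definition above) =====
theorem get_host_list_spec : Claim_equal_get_host_list := by
  intro host_num dp _ _
  unfold Spec_get_host_list get_host_list get_host_list_alt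
  simp only []
  set span := PySem.Int.floordiv host_num dp with hspan
  rw [PySem.List.foldl_append_singleton_eq_map, List.nil_append]
  by_cases hs : 0 < span
  · by_cases hn : 0 ≤ host_num
    · have hcast : host_num = ((host_num.toNat : Nat) : Int) := by omega
      rw [hcast, scatter_eq span hs host_num.toNat]
    · rw [PySem.List.pyRange_one_eq_nil (by omega : host_num ≤ 0), List.foldl_nil]
      apply List.map_congr_left
      intro j hj
      have hj' := PySem.List.mem_pyRange_one.mp hj
      exact prog_nil j host_num span hs (by omega)
  · have h0 : PySem.List.pyRange 0 span 1 = [] :=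
      PySem.List.pyRange_one_eq_nil (by omega)
    rw [h0, List.map_nil, List.map_nil]
    exact (scatter_nil _ _).symm
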